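-- pv_equiv track=rewrite | github.com/LukasUkelis/Router_testing | Modules/modbusHelper.py | formatdecimal
-- ===== SOURCE A (Python) =====
-- def formatdecimal(values):
--   answer = ""
--   value = values[1]
--   temp = bin(~value & 0xFFFF )
--   temp = temp[2:len(temp)]
--   add = "1".zfill(16)
--   temp = temp.zfill(16)
--   carry =0
--   for i in range(16 -1,-1,-1):
--     r = carry
--     r += 1 if temp[i] == '1' else 0
--     r += 1 if add[i] == '1' else 0
--     answer = ('1' if r % 2 == 1 else '0')+answer
--     carry = 0 if r <2 else 1
--   if carry !=0:
--       answer = '1'+answer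
--   return f"-{int(answer,2)}"
-- ===== SOURCE B (Python) =====
-- def formatdecimal(values):
--   value = values[1]
--   n = (~value & 0xFFFF) + 1
--   return f"-{n}"
-- ===== Notes on version B (the rewrite author's own statement) =====
-- stated objective: simpler
-- what changed: B replaces A's binary-string ripple-carry adder (bin/zfill, 16-step loop with explicit carry, int(...,2) reparse) by the direct arithmetic identity: the two's complement of the 16-bit mask is (~value & 0xFFFF) + 1, formatted negative.
import Mathlib
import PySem

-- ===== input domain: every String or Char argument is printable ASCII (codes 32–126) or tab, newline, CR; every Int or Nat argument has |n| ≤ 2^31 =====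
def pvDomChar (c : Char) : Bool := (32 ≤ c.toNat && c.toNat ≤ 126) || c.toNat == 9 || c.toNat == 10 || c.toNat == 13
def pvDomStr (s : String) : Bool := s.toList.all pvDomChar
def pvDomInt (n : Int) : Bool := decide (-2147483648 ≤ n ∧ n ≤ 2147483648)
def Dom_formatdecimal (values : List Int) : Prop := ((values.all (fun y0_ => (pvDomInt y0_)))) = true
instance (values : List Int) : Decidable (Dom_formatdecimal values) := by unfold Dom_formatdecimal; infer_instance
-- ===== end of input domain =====

-- B replaces A's binary-string ripple-carry adder by the direct arithmetic two's complement; return values agree on Pre_ (len ≥ 2).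

-- ===== PORT A =====

-- Python bin(n)[2:] for n > 0: binary digits, MSB first, no leading zeros
def pvBinAux (n : Nat) : List Char :=
  if h : n = 0 then []
  else pvBinAux (n / 2) ++ [if n % 2 = 1 then '1' else '0']
decreasing_by exact Nat.div_lt_self (Nat.pos_of_ne_zero h) (by omega)

-- int(answer, 2) on a string of '0'/'1' characters (nonnegative, so Nat)
def pvParseBin (l : List Char) : Nat :=
  l.foldl (fun a c => 2 * a + (if c = '1' then 1 else 0)) 0

-- the body of A's for-loop: state = (answer, carry), index i into temp/add
def pvStep (temp add : List Char) (p : List Char × Nat) (i : Int) : List Char × Nat :=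
  let r := p.2 + (if (PySem.List.pyGet? temp i).getD ' ' = '1' then 1 else 0)
               + (if (PySem.List.pyGet? add i).getD ' ' = '1' then 1 else 0)
  ((if r % 2 = 1 then '1' else '0') :: p.1, if r < 2 then 0 else 1)

def formatdecimal (values : List Int) : String :=
  let value := (PySem.List.pyGet? values 1).getD 0   -- values[1]; Pre_ excludes the IndexError case
  -- '~value & 0xFFFF' ported by hand: Python ~v = -v-1 and masking with 0xFFFF is floor-mod 2^16 (exact for every int)
  let masked : Nat := (PySem.Int.mod (-value - 1) 65536).toNat
  let temp : List Char := if masked = 0 then ['0'] else pvBinAux masked   -- bin(...) then [2:len] strips "0b"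
  let add : List Char := List.replicate 15 '0' ++ ['1']                    -- "1".zfill(16)
  let temp2 : List Char := List.replicate (16 - temp.length) '0' ++ temp   -- temp.zfill(16)
  let st := (PySem.List.pyRange 15 (-1) (-1)).foldl (pvStep temp2 add) ([], 0)
  let answer := if st.2 ≠ 0 then '1' :: st.1 else st.1
  "-" ++ PySem.Int.toStr ((pvParseBin answer : Nat) : Int)   -- f"-{int(answer,2)}"

-- ===== PORT B =====
def formatdecimal_alt (values : List Int) : String :=
  let value := (PySem.List.pyGet? values 1).getD 0   -- values[1]; Pre_ excludes the IndexError case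
  -- '(~value & 0xFFFF) + 1' ported by hand: Python ~v = -v-1 and masking with 0xFFFF is floor-mod 2^16 (exact for every int)
  let n := PySem.Int.mod (-value - 1) 65536 + 1
  "-" ++ PySem.Int.toStr n

-- ===== PRECONDITION & SPEC =====
-- Pre_ excludes only lists of length < 2, on which both Pythons raise IndexError (the second element is read).
def Pre_formatdecimal (values : List Int) : Prop := 2 ≤ values.length
instance (values : List Int) : Decidable (Pre_formatdecimal values) := by
  unfold Pre_formatdecimal; infer_instance
def pvWitness_formatdecimal : List Int := [3, 17]

def Spec_formatdecimal (values : List Int) (out : String) : Prop := out = formatdecimal_alt values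
instance (values : List Int) (out : String) : Decidable (Spec_formatdecimal values out) := by
  unfold Spec_formatdecimal; infer_instance

-- ===== CLAIM (what is proved, stated in full; the proofs are below) =====
def Claim_equal_formatdecimal : Prop := ∀ (values : List Int), Dom_formatdecimal values → Pre_formatdecimal values → Spec_formatdecimal values (formatdecimal values)

-- ===== LEMMAS AND PROOFS =====

theorem pvParseBin_append_singleton (l : List Char) (c : Char) :
    pvParseBin (l ++ [c]) = 2 * pvParseBin l + (if c = '1' then 1 else 0) := by
  simp [pvParseBin, List.foldl_append]

theorem pvParseBin_shift (l : List Char) (a : Nat) :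
    l.foldl (fun a c => 2 * a + (if c = '1' then 1 else 0)) a
      = a * 2 ^ l.length + pvParseBin l := by
  induction l generalizing a with
  | nil => simp [pvParseBin]
  | cons c t ih =>
      simp only [List.foldl_cons, List.length_cons]
      rw [ih]
      conv_rhs =>
        rw [show pvParseBin (c :: t)
              = t.foldl (fun a c => 2 * a + (if c = '1' then 1 else 0))
                  (2 * 0 + (if c = '1' then 1 else 0)) from rfl, ih]
      ring

theorem pvParseBin_cons (c : Char) (l : List Char) :
    pvParseBin (c :: l) = (if c = '1' then 1 else 0) * 2 ^ l.length + pvParseBin l := by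
  have := pvParseBin_shift l (2 * 0 + (if c = '1' then 1 else 0))
  simpa [pvParseBin] using this

theorem pvParseBin_pad (k : Nat) (l : List Char) :
    pvParseBin (List.replicate k '0' ++ l) = pvParseBin l := by
  induction k with
  | zero => simp
  | succ k ih => simpa [pvParseBin, List.replicate_succ] using ih

theorem pvBinAux_parse (m : Nat) : pvParseBin (pvBinAux m) = m := by
  induction m using Nat.strong_induction_on with
  | _ m ih =>
    by_cases h : m = 0
    · simp [pvBinAux, h, pvParseBin]
    · rw [pvBinAux]
      simp only [h, dite_false]
      rw [pvParseBin_append_singleton,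
        ih (m / 2) (Nat.div_lt_self (Nat.pos_of_ne_zero h) (by omega))]
      by_cases h2 : m % 2 = 1 <;> simp [h2] <;> omega

theorem pvBinAux_len (m : Nat) : ∀ k, m < 2 ^ k → (pvBinAux m).length ≤ k := by
  induction m using Nat.strong_induction_on with
  | _ m ih =>
    intro k hk
    by_cases h : m = 0
    · simp [pvBinAux, h]
    · rw [pvBinAux]
      simp only [h, dite_false, List.length_append, List.length_cons, List.length_nil]
      have hk1 : 1 ≤ k := by
        by_contra hc
        interval_cases k
        omega
      have hdiv : m / 2 < 2 ^ (k - 1) := by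
        have : (2:Nat) ^ k = 2 ^ (k - 1) * 2 := by
          rw [← pow_succ]
          congr 1
          omega
        omega
      have := ih (m / 2) (Nat.div_lt_self (Nat.pos_of_ne_zero h) (by omega)) (k - 1) hdiv
      omega

-- the descending index list [k-1, ..., 1, 0]
def pvIdxs : Nat → List Int
  | 0 => []
  | k + 1 => (k : Int) :: pvIdxs k

theorem pvRange_eq_idxs : PySem.List.pyRange 15 (-1) (-1) = pvIdxs 16 := by decide

theorem pvAdd_get_lt (j : Nat) (hj : j < 15) :
    (PySem.List.pyGet? (List.replicate 15 '0' ++ ['1'] : List Char) (j : Int)).getD ' ' = '0' := by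
  rw [PySem.List.pyGet?_natCast]
  rw [List.getElem?_append_left (by simp; omega), List.getElem?_replicate]
  simp [hj]

theorem pvAdd_get_15 :
    (PySem.List.pyGet? (List.replicate 15 '0' ++ ['1'] : List Char) ((15:Nat) : Int)).getD ' ' = '1' := by
  rfl

theorem pvGet_lt (t : List Char) (j : Nat) (hj : j < t.length) :
    (PySem.List.pyGet? t (j : Int)).getD ' ' = t[j] := by
  rw [PySem.List.pyGet?_natCast, List.getElem?_eq_getElem hj]
  rfl

theorem pvStep_eval (t : List Char) (k : Nat) (hk : k < t.length) (hk15 : k < 15)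
    (a : List Char) (c : Nat) (hc : c ≤ 1) :
    pvStep t (List.replicate 15 '0' ++ ['1']) (a, c) ((k : Nat) : Int) =
      ((if (c + (if t[k] = '1' then 1 else 0)) % 2 = 1 then '1' else '0') :: a,
       (c + (if t[k] = '1' then 1 else 0)) / 2) := by
  have hbt : (if t[k] = '1' then (1:Nat) else 0) ≤ 1 := by split <;> omega
  simp only [pvStep, pvGet_lt t k hk, pvAdd_get_lt k hk15]
  generalize (if t[k] = '1' then (1:Nat) else 0) = bt at hbt ⊢
  simp only [show ¬('0'='1') from by decide, if_false, Nat.add_zero, Prod.mk.injEq]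
  exact ⟨trivial, by split <;> omega⟩

theorem pvStep_eval15 (t : List Char) (h : 15 < t.length) (a : List Char) (c : Nat) (hc : c ≤ 1) :
    pvStep t (List.replicate 15 '0' ++ ['1']) (a, c) ((15 : Nat) : Int) =
      ((if (c + (if t[15] = '1' then 1 else 0) + 1) % 2 = 1 then '1' else '0') :: a,
       (c + (if t[15] = '1' then 1 else 0) + 1) / 2) := by
  have hbt : (if t[15] = '1' then (1:Nat) else 0) ≤ 1 := by split <;> omega
  simp only [pvStep, pvGet_lt t 15 h, pvAdd_get_15]
  generalize (if t[15] = '1' then (1:Nat) else 0) = bt at hbt ⊢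
  simp only [if_pos, Prod.mk.injEq]
  exact ⟨trivial, by split <;> omega⟩

theorem pvBitChar (n : Nat) :
    (if (if n % 2 = 1 then '1' else '0') = '1' then (1:Nat) else 0) = n % 2 := by
  rcases Nat.mod_two_eq_zero_or_one n with h | h <;> simp [h]

-- loop invariant for the trailing indices k-1..0 (add contributes 0 there):
-- the fold computes the top-k-bit sum of t's prefix with the incoming carry
theorem pvLoopInv (t : List Char) (ht : t.length = 16) :
    ∀ k, k ≤ 15 → ∀ (a : List Char) (c : Nat), c ≤ 1 →
      ∃ ob co, (pvIdxs k).foldl (pvStep t (List.replicate 15 '0' ++ ['1'])) (a, c) = (ob ++ a, co) ∧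
        ob.length = k ∧ co ≤ 1 ∧
        pvParseBin ob + co * 2 ^ k = pvParseBin (t.take k) + c := by
  intro k
  induction k with
  | zero =>
      intro _ a c hc
      exact ⟨[], c, rfl, rfl, hc, by simp [pvParseBin]⟩
  | succ k ih =>
      intro hk a c hc
      have hkt : k < t.length := by omega
      simp only [pvIdxs, List.foldl_cons]
      rw [pvStep_eval t k hkt (by omega) a c hc]
      have hbt : (if t[k] = '1' then (1:Nat) else 0) ≤ 1 := by split <;> omega
      obtain ⟨ob, co, heq, hlen, hco, hval⟩ :=
        ih (by omega) ((if (c + (if t[k] = '1' then 1 else 0)) % 2 = 1 then '1' else '0') :: a)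
          ((c + (if t[k] = '1' then 1 else 0)) / 2) (by omega)
      refine ⟨ob ++ [if (c + (if t[k] = '1' then 1 else 0)) % 2 = 1 then '1' else '0'], co,
        by rw [heq]; simp, by simp [hlen], hco, ?_⟩
      rw [pvParseBin_append_singleton, pvBitChar]
      have htake : t.take (k + 1) = t.take k ++ [t[k]] := by
        rw [List.take_succ, List.getElem?_eq_getElem hkt]
        rfl
      rw [htake, pvParseBin_append_singleton]
      have hpow : co * 2 ^ (k + 1) = 2 * (co * 2 ^ k) := by ring
      rw [hpow]
      omega

theorem pvLoop_result (t : List Char) (ht : t.length = 16) :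
    pvParseBin (if ((pvIdxs 16).foldl (pvStep t (List.replicate 15 '0' ++ ['1'])) ([], 0)).2 ≠ 0
        then '1' :: ((pvIdxs 16).foldl (pvStep t (List.replicate 15 '0' ++ ['1'])) ([], 0)).1
        else ((pvIdxs 16).foldl (pvStep t (List.replicate 15 '0' ++ ['1'])) ([], 0)).1)
      = pvParseBin t + 1 := by
  have h15 : (15 : Nat) < t.length := by omega
  have hidx : pvIdxs 16 = ((15 : Nat) : Int) :: pvIdxs 15 := rfl
  have hbt : (if t[15] = '1' then (1:Nat) else 0) ≤ 1 := by split <;> omega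
  obtain ⟨ob, co, heq, hlen, hco, hval⟩ :=
    pvLoopInv t ht 15 (le_refl 15)
      [if (0 + (if t[15] = '1' then 1 else 0) + 1) % 2 = 1 then '1' else '0']
      ((0 + (if t[15] = '1' then 1 else 0) + 1) / 2) (by split <;> omega)
  have hfold : (pvIdxs 16).foldl (pvStep t (List.replicate 15 '0' ++ ['1'])) ([], 0)
      = (ob ++ [if (0 + (if t[15] = '1' then 1 else 0) + 1) % 2 = 1 then '1' else '0'], co) := by
    rw [hidx]
    simp only [List.foldl_cons]
    rw [pvStep_eval15 t h15 [] 0 (by omega)]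
    exact heq
  rw [hfold]
  have htfull : t = t.take 15 ++ [t[15]] := by
    conv_lhs => rw [show t = t.take 16 from (List.take_of_length_le ht.le).symm]
    rw [List.take_succ, List.getElem?_eq_getElem h15]
    rfl
  have hpt : pvParseBin t = 2 * pvParseBin (t.take 15) + (if t[15] = '1' then 1 else 0) := by
    conv_lhs => rw [htfull]
    rw [pvParseBin_append_singleton]
  by_cases hcase : co = 0
  · simp only [hcase, ne_eq, not_true_eq_false, if_false]
    rw [pvParseBin_append_singleton, pvBitChar]
    rw [hcase] at hval
    simp only [Nat.zero_mul, Nat.add_zero] at hval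
    omega
  · simp only [hcase, ne_eq, not_false_eq_true, if_true]
    rw [pvParseBin_cons, pvParseBin_append_singleton, pvBitChar]
    have hlen2 : (ob ++ [if (0 + (if t[15] = '1' then 1 else 0) + 1) % 2 = 1 then '1' else '0']).length = 16 := by
      simp [hlen]
    rw [hlen2]
    have hco1 : co = 1 := by omega
    rw [hco1] at hval
    simp only [Nat.one_mul] at hval
    have h216 : (2:Nat) ^ 16 = 2 * 2 ^ 15 := by norm_num
    have h215 : (2:Nat) ^ 15 = 32768 := by norm_num
    rw [if_pos (rfl : ('1':Char) = '1'), h216, h215]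
    rw [h215] at hval
    omega

-- ===== VERDICT (by name: the statement is the Claim_ definition above) =====
theorem formatdecimal_spec : Claim_equal_formatdecimal := by
  intro values _ _
  unfold Spec_formatdecimal formatdecimal formatdecimal_alt
  simp only [pvRange_eq_idxs]
  have hnn : 0 ≤ PySem.Int.mod (-(PySem.List.pyGet? values 1).getD 0 - 1) 65536 :=
    PySem.Int.mod_nonneg _ (by norm_num)
  have hlt : PySem.Int.mod (-(PySem.List.pyGet? values 1).getD 0 - 1) 65536 < 65536 :=
    PySem.Int.mod_lt _ (by norm_num)
  set m : Nat := (PySem.Int.mod (-(PySem.List.pyGet? values 1).getD 0 - 1) 65536).toNat with hm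
  have hmlt : m < 65536 := by omega
  set temp : List Char := (if m = 0 then ['0'] else pvBinAux m) with htemp
  have hlen : temp.length ≤ 16 := by
    rw [htemp]
    split
    · simp
    · exact pvBinAux_len m 16 (by norm_num; omega)
  set T : List Char := List.replicate (16 - temp.length) '0' ++ temp with hT
  have hlen2 : T.length = 16 := by
    rw [hT, List.length_append, List.length_replicate]
    omega
  have hparse : pvParseBin T = m := by
    rw [hT, pvParseBin_pad, htemp]
    split
    · simp [pvParseBin]
      omega
    · exact pvBinAux_parse m
  have hmc : ((m : Nat) : Int) = PySem.Int.mod (-(PySem.List.pyGet? values 1).getD 0 - 1) 65536 :=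
    Int.toNat_of_nonneg hnn
  rw [pvLoop_result T hlen2, hparse,
    show (((m + 1 : Nat)) : Int)
        = PySem.Int.mod (-(PySem.List.pyGet? values 1).getD 0 - 1) 65536 + 1 by
      push_cast
      omega]
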